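-- pv_equiv track=rewrite | github.com/Christian-bustelo/Nist800_90B_impl | testPermutacion.py | calculate_max_collision
-- ===== SOURCE A (Python) =====
-- def calculate_max_collision(data):
--     C = []  # List to store the number of samples observed to find two occurrences of the same value
--     i = 0
--     L = len(data)
--
--     while i < L-1:
--         tmp = [data[i]]
--         j = 1
--         while i + j < L:
--             if data[i + j] in tmp:
--                 C.append(j + 1)  # Include both indices i and i + j
--                 i = i + j + 1
--                 break
--             else:
--                 tmp.append(data[i + j])
--             j += 1
--         else:
--             C.append(j)  # Include only the current index i
--             i += 1
--     T = max(C)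
--
--     return T
-- ===== SOURCE B (Python) =====
-- def calculate_max_collision(data):
--     L = len(data)
--     C = []
--     s = 0
--     seen = set()
--     for k, x in enumerate(data):
--         if x in seen:
--             C.append(k - s + 1)
--             s = k + 1
--             seen = set()
--         else:
--             seen.add(x)
--     if s < L - 1:
--         C.append(L - s)
--     return max(C)
-- ===== Notes on version B (the rewrite author's own statement) =====
-- stated objective: faster
-- what changed: Replaced A's nested index loops (inner linear scan of a tmp list per start position, plus re-scanning the un-collided tail from every remaining start) by a single forward pass keeping a segment start and a hash set, recording each collision segment and one tail entry.
import Mathlib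
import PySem

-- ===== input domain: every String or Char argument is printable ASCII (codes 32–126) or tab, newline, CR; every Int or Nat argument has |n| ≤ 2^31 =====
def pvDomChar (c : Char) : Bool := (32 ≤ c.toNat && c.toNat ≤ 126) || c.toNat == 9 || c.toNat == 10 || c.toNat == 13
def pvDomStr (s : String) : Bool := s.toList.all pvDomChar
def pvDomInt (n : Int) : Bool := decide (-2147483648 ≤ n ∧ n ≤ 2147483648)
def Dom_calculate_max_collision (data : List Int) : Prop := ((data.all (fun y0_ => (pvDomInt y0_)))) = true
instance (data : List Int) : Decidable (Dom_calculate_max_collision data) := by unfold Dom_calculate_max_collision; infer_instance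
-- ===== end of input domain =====

-- B replaces A's nested index loops by one forward pass with a segment start and a seen-set.

-- ===== PORT A =====
-- inner 'while i + j < L' loop: returns (value appended to C, new i); indices stay in range, so pyGetD
-- is exact; fuel only makes the recursion structural (proved sufficient in the lemmas below)
def pyInnerA (fuel : Nat) (data : List Int) (L i j : Int) (tmp : List Int) : Int × Int :=
  match fuel with
  | 0 => (j, i + 1)
  | fuel + 1 =>
    if i + j < L then
      let v := PySem.List.pyGetD data (i + j) 0
      if tmp.contains v then (j + 1, i + j + 1)
      else pyInnerA fuel data L i (j + 1) (tmp ++ [v])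
    else (j, i + 1)

-- outer 'while i < L-1' loop, accumulating C
def pyOuterA (fuel : Nat) (data : List Int) (L i : Int) (C : List Int) : List Int :=
  match fuel with
  | 0 => C
  | fuel + 1 =>
    if i < L - 1 then
      let r := pyInnerA fuel data L i 1 [PySem.List.pyGetD data i 0]
      pyOuterA fuel data L r.2 (C ++ [r.1])
    else C

def calculate_max_collision (data : List Int) : Int :=
  let L : Int := (data.length : Int)
  let C := pyOuterA data.length data L 0 []
  match PySem.List.max? C (fun y => y) with
  | some T => T
  | none => 0   -- unreachable under Pre_ (max([]) raises ValueError in Python)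

-- ===== PORT B =====
-- one pass over enumerate(data) with state (C, s, seen)
def stepB (acc : List Int × Int × PySem.Set Int) (kx : Int × Int) : List Int × Int × PySem.Set Int :=
  if PySem.Set.contains acc.2.2 kx.2 then
    (acc.1 ++ [kx.1 - acc.2.1 + 1], kx.1 + 1, PySem.Set.empty)
  else
    (acc.1, acc.2.1, PySem.Set.add acc.2.2 kx.2)

def calculate_max_collision_alt (data : List Int) : Int :=
  let L : Int := (data.length : Int)
  let st := (PySem.List.enumerate data 0).foldl stepB ([], 0, PySem.Set.empty)
  let C := if st.2.1 < L - 1 then st.1 ++ [L - st.2.1] else st.1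
  match PySem.List.max? C (fun y => y) with
  | some T => T
  | none => 0   -- unreachable under Pre_ (max([]) raises ValueError in Python)

-- ===== PRECONDITION & SPEC =====
-- Pre_ excludes lists of length < 2: there Python A's C stays empty and max(C) raises ValueError (B likewise).
def Pre_calculate_max_collision (data : List Int) : Prop := 2 ≤ data.length
instance (data : List Int) : Decidable (Pre_calculate_max_collision data) := by
  unfold Pre_calculate_max_collision; infer_instance

def pvWitness_calculate_max_collision : List Int := [1, 2]

def Spec_calculate_max_collision (data : List Int) (out : Int) : Prop := out = calculate_max_collision_alt data
instance (data : List Int) (out : Int) : Decidable (Spec_calculate_max_collision data out) := by unfold Spec_calculate_max_collision; infer_instance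

-- ===== CLAIM (what is proved, stated in full; the proofs are below) =====
def Claim_equal_calculate_max_collision : Prop := ∀ (data : List Int), Dom_calculate_max_collision data → Pre_calculate_max_collision data → Spec_calculate_max_collision data (calculate_max_collision data)

-- ===== LEMMAS AND PROOFS =====

-- index (0-based) of the first element of xs already seen in tmp (tmp grows along the scan)
def scanDup (tmp xs : List Int) : Option Nat :=
  match xs with
  | [] => none
  | x :: r => if tmp.contains x then some 0 else (scanDup (tmp ++ [x]) r).map (· + 1)

theorem scanDup_some_lt (tmp xs : List Int) (d : Nat) (h : scanDup tmp xs = some d) :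
    d < xs.length := by
  induction xs generalizing tmp d with
  | nil => simp [scanDup] at h
  | cons x r ih =>
    simp only [scanDup] at h
    split at h
    · simp at h ⊢; omega
    · simp only [Option.map_eq_some_iff] at h
      obtain ⟨d', hd', rfl⟩ := h
      have := ih _ _ hd'
      simp; omega

-- A's collision-segment list as a function of the remaining suffix (A re-scans an un-collided tail from every start)
def outA (xs : List Int) : List Int :=
  match xs with
  | [] => []
  | [_] => []
  | x :: y :: r =>
    match h : scanDup [x] (y :: r) with
    | some d => ((d : Int) + 2) :: outA ((y :: r).drop (d + 1))
    | none => ((xs.length : Int)) :: outA (y :: r)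
termination_by xs.length
decreasing_by
  · have := scanDup_some_lt [x] (y :: r) d h
    simp only [List.length_cons] at this ⊢
    simp only [List.length_drop, List.length_cons]
    omega
  · simp

-- B's collision-segment list (a single tail entry instead of A's cascade)
def outB (xs : List Int) : List Int :=
  match xs with
  | [] => []
  | [_] => []
  | x :: y :: r =>
    match h : scanDup [x] (y :: r) with
    | some d => ((d : Int) + 2) :: outB ((y :: r).drop (d + 1))
    | none => [((xs.length : Int))]
termination_by xs.length
decreasing_by
  have := scanDup_some_lt [x] (y :: r) d h
  simp only [List.length_cons] at this ⊢
  simp only [List.length_drop, List.length_cons]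
  omega

def finishB (L : Int) (st : List Int × Int × PySem.Set Int) : List Int :=
  if st.2.1 < L - 1 then st.1 ++ [L - st.2.1] else st.1

theorem innerA_eq (data : List Int) (i : Nat) :
    ∀ (fuel j : Nat) (tmp : List Int), i + j ≤ data.length → data.length - (i + j) ≤ fuel →
    pyInnerA fuel data (data.length : Int) (i : Int) (j : Int) tmp =
      (match scanDup tmp (data.drop (i + j)) with
      | some d => ((j : Int) + d + 1, (i : Int) + j + d + 1)
      | none => ((data.length : Int) - i, (i : Int) + 1))
  | 0, j, tmp, hle, hk => by
    have he : i + j = data.length := by omega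
    unfold pyInnerA
    rw [List.drop_of_length_le (by omega)]
    simp only [scanDup]
    have : (j : Int) = (data.length : Int) - i := by omega
    rw [this]
  | (fuel+1), j, tmp, hle, hk => by
    by_cases hlt : i + j < data.length
    · unfold pyInnerA
      rw [if_pos (by omega)]
      have hv : PySem.List.pyGetD data ((i : Int) + (j : Int)) 0 = data.getD (i+j) 0 := by
        rw [show (i : Int) + (j : Int) = ((i + j : Nat) : Int) by push_cast; ring,
          PySem.List.pyGetD_natCast]
      have hgd : data.getD (i+j) 0 = data[i+j] := List.getD_eq_getElem data 0 hlt
      have hdrop : data.drop (i + j) = data[i+j] :: data.drop (i + j + 1) :=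
        (List.drop_eq_getElem_cons hlt)
      rw [hdrop]
      simp only [hv, hgd, scanDup]
      by_cases hc : tmp.contains data[i+j]
      · simp only [hc, if_pos]
        simp
      · simp only [hc, if_false, Bool.false_eq_true]
        have ih := innerA_eq data i fuel (j+1) (tmp ++ [data[i+j]]) (by omega) (by omega)
        rw [show ((j : Int) + 1) = ((j+1 : Nat) : Int) by push_cast; ring] at *
        rw [show i + (j+1) = i + j + 1 by omega] at ih
        rw [ih]
        cases hs : scanDup (tmp ++ [data[i+j]]) (data.drop (i + j + 1)) with
        | none => simp
        | some d => simp; constructor <;> ring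
    · have he : i + j = data.length := by omega
      unfold pyInnerA
      rw [if_neg (by omega)]
      rw [List.drop_of_length_le (by omega)]
      simp only [scanDup]
      have : (j : Int) = (data.length : Int) - i := by omega
      rw [this]

theorem outA_short (xs : List Int) (h : xs.length ≤ 1) : outA xs = [] := by
  cases xs with
  | nil => rw [outA]
  | cons x t =>
    cases t with
    | nil => rw [outA]
    | cons y r => simp at h

theorem outerA_eq (data : List Int) :
    ∀ (fuel : Nat) (i : Nat) (C : List Int), i ≤ data.length → data.length - i ≤ fuel →
    pyOuterA fuel data (data.length : Int) (i : Int) C = C ++ outA (data.drop i) := by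
  intro fuel
  induction fuel with
  | zero =>
    intro i C hle hk
    unfold pyOuterA
    rw [List.drop_of_length_le (by omega), outA_short _ (by simp)]
    simp
  | succ fuel IH =>
    intro i C hle hk
    unfold pyOuterA
    by_cases hcond : (i : Int) < (data.length : Int) - 1
    · rw [if_pos hcond]
      have hi1 : i + 1 < data.length := by omega
      have hdrop : data.drop i = data[i] :: data.drop (i + 1) :=
        List.drop_eq_getElem_cons (by omega)
      have hv : PySem.List.pyGetD data (i : Int) 0 = data[i] := by
        rw [PySem.List.pyGetD_natCast]; exact List.getD_eq_getElem data 0 (by omega)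
      have hinner := innerA_eq data i fuel 1 [data[i]] (by omega) (by omega)
      push_cast at hinner
      obtain ⟨y, r, hyr⟩ := List.exists_cons_of_ne_nil
        (show data.drop (i + 1) ≠ [] by
          intro hnil; have := congrArg List.length hnil; simp at this; omega)
      cases hs : scanDup [data[i]] (data.drop (i + 1)) with
      | some d =>
        simp only [hs] at hinner
        rw [hv, hinner]
        have hdlt := scanDup_some_lt _ _ _ hs
        simp only [List.length_drop] at hdlt
        have harith2 : (i : Int) + 1 + (d : Int) + 1 = ((i + d + 2 : Nat) : Int) := by
          push_cast; ring
        simp only [harith2]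
        rw [IH (i + d + 2) (C ++ [(1 : Int) + d + 1]) (by omega) (by omega)]
        have houtA : outA (data.drop i) = ((d : Int) + 2) :: outA ((y :: r).drop (d + 1)) := by
          rw [hdrop, hyr]
          rw [outA]
          rw [← hyr, hs]
        rw [houtA]
        have hdd : (y :: r).drop (d + 1) = data.drop (i + d + 2) := by
          rw [← hyr, List.drop_drop]
          congr 1; omega
        rw [hdd]
        simp only [List.append_assoc, List.cons_append, List.nil_append]
        congr 2
        ring
      | none =>
        simp only [hs] at hinner
        rw [hv, hinner]
        simp only [show ((i : Int) + 1) = ((i + 1 : Nat) : Int) from by push_cast; ring]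
        rw [IH (i + 1) (C ++ [(data.length : Int) - i]) (by omega) (by omega)]
        have houtA : outA (data.drop i) =
            (((data[i] :: y :: r).length : Int)) :: outA (y :: r) := by
          rw [hdrop, hyr]
          rw [outA]
          rw [← hyr, hs]
        rw [houtA, ← hyr]
        have hlen : (((data[i] :: data.drop (i + 1)).length : Int)) = (data.length : Int) - i := by
          simp; omega
        rw [hlen]
        simp
    · rw [if_neg hcond]
      rw [outA_short _ (by simp; omega)]
      simp

theorem foldSeg (rest : List Int) :
    ∀ (k s : Int) (C0 : List Int) (seen : PySem.Set Int),
    (PySem.List.enumerate rest k).foldl stepB (C0, s, seen) =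
      match scanDup seen rest with
      | some d => (PySem.List.enumerate (rest.drop (d + 1)) (k + d + 1)).foldl stepB
                    (C0 ++ [k + d - s + 1], k + d + 1, PySem.Set.empty)
      | none => (C0, s, rest.foldl PySem.Set.add seen) := by
  induction rest with
  | nil => intro k s C0 seen; simp [scanDup, PySem.List.enumerate]
  | cons x r ih =>
    intro k s C0 seen
    rw [PySem.List.enumerate_cons, List.foldl_cons]
    by_cases hmem : x ∈ seen
    · have hb : List.contains seen x = true := by simpa using hmem
      have hstep : stepB (C0, s, seen) (k, x) = (C0 ++ [k - s + 1], k + 1, PySem.Set.empty) := by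
        simp [stepB, PySem.Set.contains, hmem]
      have hs : scanDup seen (x :: r) = some 0 := by
        simp only [scanDup]
        rw [if_pos hb]
      rw [hstep, hs]
      norm_num
    · have hb : List.contains seen x = false := by simpa using hmem
      have hstep : stepB (C0, s, seen) (k, x) = (C0, s, PySem.Set.add seen x) := by
        simp [stepB, PySem.Set.contains, hmem]
      have hadd : PySem.Set.add seen x = seen ++ [x] := by
        simp only [PySem.Set.add]
        rw [if_neg (by simpa using hmem)]
      have hscan : scanDup seen (x :: r) = (scanDup (seen ++ [x]) r).map (· + 1) := by
        simp only [scanDup]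
        rw [if_neg (by simpa using hmem)]
      rw [hstep, hscan, hadd, ih (k + 1) s C0 (seen ++ [x])]
      cases hs2 : scanDup (seen ++ [x]) r with
      | none =>
        simp [List.foldl_cons, hadd]
      | some d =>
        have h1 : (r.drop (d + 1)) = ((x :: r).drop (d + 1 + 1)) := by simp
        have h2 : (k + 1 + (d : Int) + 1) = (k + ((d : Nat) + 1 : Nat) + 1) := by push_cast; ring
        have h3 : (k + 1 + (d : Int) - s + 1) = (k + ((d : Nat) + 1 : Nat) - s + 1) := by push_cast; ring
        simp only [Option.map_some]
        rw [h1, h2, h3]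

theorem outB_cons_none (x : Int) (y : Int) (r : List Int)
    (hs : scanDup [x] (y :: r) = none) :
    outB (x :: y :: r) = [(((x :: y :: r).length : Int))] := by
  rw [outB, hs]

theorem foldB_eq (n : Nat) : ∀ (xs : List Int), xs.length = n → ∀ (s : Int) (C0 : List Int),
    finishB (s + (xs.length : Int))
      ((PySem.List.enumerate xs s).foldl stepB (C0, s, PySem.Set.empty)) = C0 ++ outB xs := by
  induction n using Nat.strong_induction_on with
  | _ n IH =>
    intro xs hn s C0
    cases xs with
    | nil =>
      simp [PySem.List.enumerate, finishB, outB]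
    | cons x rest =>
      rw [PySem.List.enumerate_cons, List.foldl_cons]
      have hstep : stepB (C0, s, PySem.Set.empty) (s, x) = (C0, s, PySem.Set.add PySem.Set.empty x) := by
        simp [stepB, PySem.Set.contains, PySem.Set.empty]
      have hadd : PySem.Set.add PySem.Set.empty x = [x] := by
        simp [PySem.Set.add, PySem.Set.empty]
      have hfs := foldSeg rest (s + 1) s C0 [x]
      cases hs : scanDup [x] rest with
      | some d =>
        simp only [hs] at hfs
        rw [hstep, hadd, hfs]
        have hdlt := scanDup_some_lt _ _ _ hs
        obtain ⟨y, r, rfl⟩ : ∃ y r, rest = y :: r := by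
          cases rest with
          | nil => simp [scanDup] at hs
          | cons y r => exact ⟨y, r, rfl⟩
        have harith : s + 1 + (d : Int) + 1 = (s + (d : Int) + 2) := by ring
        have hL : s + (((x :: y :: r).length : Nat) : Int) =
            (s + (d : Int) + 2) + (((y :: r).drop (d + 1)).length : Int) := by
          simp only [List.length_cons, List.length_drop, List.length_cons] at *
          push_cast [Nat.sub_add_cancel]
          omega
        rw [hL, harith]
        have := IH (((y :: r).drop (d + 1)).length)
          (by simp only [List.length_drop, List.length_cons] at *; omega)
          ((y :: r).drop (d + 1)) rfl (s + (d : Int) + 2) (C0 ++ [s + 1 + (d : Int) - s + 1])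
        rw [this]
        have houtB : outB (x :: y :: r) = ((d : Int) + 2) :: outB ((y :: r).drop (d + 1)) := by
          rw [outB, hs]
        rw [houtB]
        have h22 : s + 1 + (d : Int) - s + 1 = (d : Int) + 2 := by ring
        rw [h22]
        simp
      | none =>
        simp only [hs] at hfs
        rw [hstep, hadd, hfs]
        cases rest with
        | nil =>
          simp [finishB, outB]
        | cons y r =>
          rw [outB_cons_none x y r hs]
          simp only [finishB]
          rw [if_pos (by simp; omega)]
          simp

theorem foldl_max_char (l : List Int) : ∀ c : Int,
    l.foldl max c = match PySem.List.max? l (fun y => y) with | none => c | some m => max c m := by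
  induction l with
  | nil => intro c; simp [PySem.List.max?]
  | cons x t ih =>
    intro c
    rw [List.foldl_cons, ih (max c x), PySem.List.max?_id_cons]
    have hx := ih x
    cases ht : PySem.List.max? t (fun y => y) with
    | none =>
      rw [ht] at hx
      simp at hx
      rw [hx]
    | some m =>
      rw [ht] at hx
      simp at hx
      rw [hx]
      show max (max c x) m = max c (max x m)
      rw [max_assoc]

theorem outA_le (n : Nat) : ∀ (xs : List Int), xs.length = n →
    ∀ v ∈ outA xs, v ≤ (xs.length : Int) := by
  induction n using Nat.strong_induction_on with
  | _ n IH =>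
    intro xs hn v hv
    cases xs with
    | nil => rw [outA] at hv; simp at hv
    | cons x t =>
      cases t with
      | nil => rw [outA] at hv; simp at hv
      | cons y r =>
        rw [outA] at hv
        split at hv
        · next d hs =>
          have hdlt := scanDup_some_lt _ _ _ hs
          rcases List.mem_cons.mp hv with h | h
          · subst h; simp at hdlt ⊢; omega
          · have := IH ((y :: r).drop (d + 1)).length
              (by simp only [List.length_drop, List.length_cons] at *; omega) _ rfl v h
            simp only [List.length_drop, List.length_cons] at this ⊢
            omega
        · next hs =>
          rcases List.mem_cons.mp hv with h | h
          · subst h; simp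
          · have := IH (y :: r).length (by simp only [List.length_cons] at *; omega) _ rfl v h
            simp only [List.length_cons] at this ⊢
            push_cast at this ⊢
            omega

theorem max?_outA_eq_outB (n : Nat) : ∀ (xs : List Int), xs.length = n →
    PySem.List.max? (outA xs) (fun y => y) = PySem.List.max? (outB xs) (fun y => y) := by
  induction n using Nat.strong_induction_on with
  | _ n IH =>
    intro xs hn
    cases xs with
    | nil => rw [outA, outB]
    | cons x t =>
      cases t with
      | nil => rw [outA, outB]
      | cons y r =>
        rw [outA, outB]
        cases hs : scanDup [x] (y :: r) with
        | some d =>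
          have hdlt := scanDup_some_lt _ _ _ hs
          rw [PySem.List.max?_id_cons, PySem.List.max?_id_cons]
          have hIH := IH ((y :: r).drop (d + 1)).length
            (by simp only [List.length_drop, List.length_cons] at *; omega) _ rfl
          congr 1
          rw [foldl_max_char, foldl_max_char, hIH]
        | none =>
          rw [PySem.List.max?_id_cons, PySem.List.max?_id_cons]
          congr 1
          rw [foldl_max_char]
          cases hm : PySem.List.max? (outA (y :: r)) (fun y => y) with
          | none => simp
          | some m =>
            have hmem := PySem.List.max?_mem hm
            have hle := outA_le (y :: r).length _ rfl m hmem
            simp only [List.length_cons] at hle ⊢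
            simp
            omega

theorem ports_eq (data : List Int) :
    calculate_max_collision data = calculate_max_collision_alt data := by
  unfold calculate_max_collision calculate_max_collision_alt
  have hA : pyOuterA data.length data (data.length : Int) 0 [] = outA data := by
    have := outerA_eq data data.length 0 [] (by omega) (by omega)
    simpa using this
  have hB := foldB_eq data.length data rfl 0 []
  simp only [finishB, zero_add, List.nil_append] at hB
  simp only [hA, hB]
  rw [max?_outA_eq_outB data.length data rfl]

-- ===== VERDICT (by name: the statement is the Claim_ definition above) =====
theorem calculate_max_collision_spec : Claim_equal_calculate_max_collision := by
  intro data _hdom _hpre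
  unfold Spec_calculate_max_collision
  exact ports_eq data
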